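-- pv_equiv track=rewrite | github.com/jcabrero/multfs_public | basic_extraction/extraction_btc.py | gen_dictio_of_values
-- ===== SOURCE A (Python) =====
-- import math
--
-- def gen_dictio_of_values(dictio_of_ips):
-- 	lst_btcs = [(k, len(v)) for k, v in dictio_of_ips.items()]
-- 	lst_btcs = sorted(lst_btcs, key= lambda x: x[1], reverse=True )
-- 	divisions = int(math.ceil(float(len(lst_btcs)) / 254.0))
-- 	dictio = {}
-- 	for i in range(0, 254):
-- 		start = i * divisions
-- 		end = (i + 1) * divisions
-- 		for elem in lst_btcs[start:end]:
-- 			dictio[elem[0]] = (i + 1)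
-- 	return dictio
-- ===== SOURCE B (Python) =====
-- def gen_dictio_of_values(dictio_of_ips):
--     pairs = [(k, len(v)) for k, v in dictio_of_ips.items()]
--     pairs = sorted(pairs, key=lambda p: -p[1])
--     n = len(pairs)
--     if n == 0:
--         return {}
--     divisions = (n + 253) // 254
--     out = []
--     idx = 0
--     for k, _ in pairs:
--         out.append((k, idx // divisions + 1))
--         idx += 1
--     return dict(out)
-- ===== Notes on version B (the rewrite author's own statement) =====
-- stated objective: simpler
-- what changed: Replaces the fixed 254-iteration bucket-slicing loop with one indexed pass that computes each key's bucket as idx // divisions + 1 into an explicit pair list turned into a dict at the end; the sort uses an ascending negated-count key and the ceiling is pure integer arithmetic (n + 253) // 254 instead of float math.ceil, with an explicit empty-input guard.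
import Mathlib
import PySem

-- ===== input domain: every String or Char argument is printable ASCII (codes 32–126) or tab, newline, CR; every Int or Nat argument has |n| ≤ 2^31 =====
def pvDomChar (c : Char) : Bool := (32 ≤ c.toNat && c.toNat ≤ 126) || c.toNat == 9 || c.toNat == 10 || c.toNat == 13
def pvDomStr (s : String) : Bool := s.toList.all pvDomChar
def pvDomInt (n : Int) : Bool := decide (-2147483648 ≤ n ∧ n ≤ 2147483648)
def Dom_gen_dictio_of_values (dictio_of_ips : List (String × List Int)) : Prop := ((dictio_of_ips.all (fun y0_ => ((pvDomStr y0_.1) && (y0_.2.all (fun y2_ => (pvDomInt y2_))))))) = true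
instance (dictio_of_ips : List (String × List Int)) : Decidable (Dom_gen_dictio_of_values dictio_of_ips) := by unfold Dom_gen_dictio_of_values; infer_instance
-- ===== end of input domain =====

-- B replaces A's 254-iteration bucket-slicing loop with one indexed pass building an explicit pair list (bucket = idx // divisions + 1), sorting by an ascending negated-count key and computing the ceiling by integer arithmetic (simpler decomposition, same result).


-- ===== PORT A =====
-- int(math.ceil(float(n) / 254.0)) is exact ceiling division for list lengths (the quotient's
-- distance to the nearest integer is ≥ 1/254, far above float error), ported as -((-n) // 254).
def gen_dictio_of_values (dictio_of_ips : List (String × List Int)) : List (String × Int) :=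
  let lst_btcs := (PySem.Dict.ofList dictio_of_ips).items.map (fun kv => (kv.1, (kv.2.length : Int)))
  let lst_btcs2 := PySem.List.sorted lst_btcs (fun x => x.2) true
  let divisions : Int := -(PySem.Int.floordiv (-(lst_btcs2.length : Int)) 254)
  ((PySem.List.pyRange 0 254 1).foldl (fun dictio i =>
      (PySem.List.slice lst_btcs2 (some (i * divisions)) (some ((i + 1) * divisions))).foldl
        (fun dictio elem => dictio.insert elem.1 (i + 1)) dictio)
    PySem.Dict.empty).items

-- ===== PORT B =====
def gen_dictio_of_values_alt (dictio_of_ips : List (String × List Int)) : List (String × Int) :=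
  let pairs := PySem.List.sorted
    ((PySem.Dict.ofList dictio_of_ips).items.map (fun kv => (kv.1, (kv.2.length : Int))))
    (fun p => -p.2) false
  let n : Int := PySem.List.len pairs
  if n = 0 then []
  else
    let divisions := PySem.Int.floordiv (n + 253) 254
    let out := pairs.foldl
      (fun (s : List (String × Int) × Int) p =>
        (s.1 ++ [(p.1, PySem.Int.floordiv s.2 divisions + 1)], s.2 + 1)) ([], 0)
    (PySem.Dict.ofList out.1).items

-- ===== PRECONDITION & SPEC =====
def Spec_gen_dictio_of_values (dictio_of_ips : List (String × List Int)) (out : List (String × Int)) : Prop := out = gen_dictio_of_values_alt dictio_of_ips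
instance (dictio_of_ips : List (String × List Int)) (out : List (String × Int)) : Decidable (Spec_gen_dictio_of_values dictio_of_ips out) := by unfold Spec_gen_dictio_of_values; infer_instance

-- ===== CLAIM (what is proved, stated in full; the proofs are below) =====
def Claim_equal_gen_dictio_of_values : Prop := ∀ (dictio_of_ips : List (String × List Int)), Dom_gen_dictio_of_values dictio_of_ips → Spec_gen_dictio_of_values dictio_of_ips (gen_dictio_of_values dictio_of_ips)

-- ===== LEMMAS AND PROOFS =====

-- sorting by the NEGATED count ascending is sorting by the count descending (same stable comparator)
theorem pv_sort_neg (l : List (String × Int)) :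
    PySem.List.sorted l (fun p => -p.2) false = PySem.List.sorted l (fun x => x.2) true := by
  rw [PySem.List.sorted_eq_foldl_insertBy, PySem.List.sorted_rev_eq_foldl_insertBy]
  have h : (fun (a b : String × Int) => decide (-a.2 < -b.2))
      = (fun (a b : String × Int) => decide (b.2 < a.2)) := by
    funext a b; simp
  rw [h]

-- B's indexed building loop produces the enumerate map
theorem pv_build (f : Int → Int) :
    ∀ (pairs : List (String × Int)) (acc : List (String × Int)) (i : Int),
    (pairs.foldl (fun (s : List (String × Int) × Int) p => (s.1 ++ [(p.1, f s.2)], s.2 + 1)) (acc, i))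
      = (acc ++ (PySem.List.enumerate pairs i).map (fun q => (q.2.1, f q.1)), i + pairs.length) := by
  intro pairs
  induction pairs with
  | nil => intro acc i; simp [PySem.List.enumerate_nil]
  | cons p t ih =>
    intro acc i
    simp only [List.foldl_cons, ih, PySem.List.enumerate_cons, List.map_cons, Prod.mk.injEq]
    refine ⟨by simp, by push_cast [List.length_cons]; ring⟩

-- a nested 'for' loop appending inner folds is the fold over the flatMap
theorem pv_foldl_foldl_eq_foldl_flatMap {α β γ : Type} (l : List α) (g : α → List β)
    (h : γ → β → γ) (init : γ) :
    l.foldl (fun acc x => (g x).foldl h acc) init = (l.flatMap g).foldl h init := by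
  induction l generalizing init with
  | nil => rfl
  | cons a t ih => simp [List.flatMap_cons, List.foldl_append, ih]

-- mapping the bucket function over an enumerate segment lying inside one bucket is constant
theorem pv_enum_const_bucket (dn : Nat) (t : List (String × Int)) (s : Int) (c : Int)
    (hc : ∀ j : Nat, j < t.length → PySem.Int.floordiv (s + j) dn + 1 = c) :
    (PySem.List.enumerate t s).map (fun p => (p.2.1, PySem.Int.floordiv p.1 (dn : Int) + 1))
      = t.map (fun e => (e.1, c)) := by
  induction t generalizing s with
  | nil => rfl
  | cons a t ih =>
    have h0 := hc 0 (by simp)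
    simp only [Int.natCast_zero, add_zero] at h0
    simp only [PySem.List.enumerate_cons, List.map_cons, h0]
    refine congrArg _ (ih (s + 1) ?_)
    intro j hj
    have := hc (j + 1) (by simpa using Nat.succ_lt_succ hj)
    simpa [add_assoc, add_comm, add_left_comm] using this

-- core: A's bucket-sliced flatMap equals the enumerate-with-arithmetic map
theorem pv_core (dn : Nat) (hd : 0 < dn) :
    ∀ (m : Nat) (l : List (String × Int)) (base : Nat), l.length ≤ m * dn →
    (List.range m).flatMap (fun k => ((l.drop (k * dn)).take dn).map
        (fun e => (e.1, ((base : Int) + k + 1))))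
      = (PySem.List.enumerate l ((base : Int) * dn)).map
          (fun p => (p.2.1, PySem.Int.floordiv p.1 (dn : Int) + 1)) := by
  intro m
  induction m with
  | zero =>
    intro l base hl
    have : l = [] := List.length_eq_zero_iff.mp (by omega)
    subst this; rfl
  | succ m ih =>
    intro l base hl
    rw [List.range_succ_eq_map, List.flatMap_cons, List.flatMap_map]
    have hstep : ∀ k : Nat,
        ((l.drop ((k + 1) * dn)).take dn).map (fun e => (e.1, ((base : Int) + ((k : Int) + 1) + 1)))
          = (((l.drop dn).drop (k * dn)).take dn).map (fun e => (e.1, (((base + 1 : Nat) : Int) + k + 1))) := by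
      intro k
      have h1 : (l.drop dn).drop (k * dn) = l.drop ((k + 1) * dn) := by
        rw [List.drop_drop]; ring_nf
      rw [h1]
      refine List.map_congr_left (fun e _ => ?_)
      push_cast; ring_nf
    have htail : (List.range m).flatMap
        (fun k => ((l.drop ((Nat.succ k) * dn)).take dn).map (fun e => (e.1, ((base : Int) + (Nat.succ k : Nat) + 1))))
        = (PySem.List.enumerate (l.drop dn) (((base + 1 : Nat) : Int) * dn)).map
            (fun p => (p.2.1, PySem.Int.floordiv p.1 (dn : Int) + 1)) := by
      rw [← ih (l.drop dn) (base + 1)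
        (by rw [List.length_drop]; have h : (m + 1) * dn = m * dn + dn := by ring
            omega)]
      refine congrArg (fun f => (List.range m).flatMap f) (funext fun k => ?_)
      have := hstep k
      simpa [Nat.succ_eq_add_one] using this
    -- rewrite the head bucket and reassemble the enumerate of l = take ++ drop
    conv_rhs => rw [← List.take_append_drop dn l]
    rw [PySem.List.enumerate_append, List.map_append]
    have hhead : (PySem.List.enumerate (l.take dn) ((base : Int) * dn)).map
        (fun p => (p.2.1, PySem.Int.floordiv p.1 (dn : Int) + 1))
        = (l.take dn).map (fun e => (e.1, ((base : Int) + (0 : Int) + 1))) := by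
      refine pv_enum_const_bucket dn _ _ _ ?_
      intro j hj
      have hj' : (j : Int) < (dn : Int) := by
        have : j < dn := lt_of_lt_of_le hj (by simp [List.length_take])
        exact_mod_cast this
      have hdiv : PySem.Int.floordiv ((base : Int) * dn + j) dn = (base : Int) := by
        rw [PySem.Int.floordiv_eq_iff_of_pos (by exact_mod_cast hd)]
        constructor
        · have : (0 : Int) ≤ (j : Int) := Int.natCast_nonneg j
          linarith
        · have : ((base : Int) + 1) * dn = (base : Int) * dn + dn := by ring
          rw [this]; linarith
      rw [hdiv]; ring
    rw [hhead]
    refine congrArg₂ (· ++ ·) ?_ ?_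
    · simp
    · rw [htail]
      by_cases hlen : dn ≤ l.length
      · have hlt : (l.take dn).length = dn := by simp [List.length_take]; omega
        rw [hlt]
        have h2 : ((base + 1 : Nat) : Int) * dn = (base : Int) * dn + (dn : Nat) := by push_cast; ring
        rw [h2]
      · have hnil : l.drop dn = [] := List.drop_eq_nil_of_le (by omega)
        rw [hnil]
        simp [PySem.List.enumerate_nil]

-- A's float ceiling -((-n) // 254) and B's integer ceiling (n + 253) // 254 are both the Nat ceiling
theorem pv_divisions_eq (n : Nat) :
    -(PySem.Int.floordiv (-(n : Int)) 254) = (((n + 253) / 254 : Nat) : Int) := by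
  rw [PySem.Int.neg_floordiv_neg_eq_iff_of_pos (a := (n : Int)) (b := 254) (by omega)]
  constructor <;> omega

theorem pv_divisions_eq' (n : Nat) :
    PySem.Int.floordiv ((n : Int) + 253) 254 = (((n + 253) / 254 : Nat) : Int) := by
  have h : ((n : Int) + 253) = (((n + 253 : Nat)) : Int) := by push_cast; ring
  rw [h]
  exact_mod_cast PySem.Int.floordiv_natCast (n + 253) 254

-- A's whole bucket loop equals the enumerate loop, for any q with 0 < q and n ≤ 254·q
theorem pv_main (lst : List (String × Int)) (q : Nat) (hq : 0 < q) (hn : lst.length ≤ 254 * q) :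
    ((PySem.List.pyRange 0 254 1).foldl (fun dictio i =>
        (PySem.List.slice lst (some (i * (q : Int))) (some ((i + 1) * (q : Int)))).foldl
          (fun d e => d.insert e.1 (i + 1)) dictio) PySem.Dict.empty)
      = (PySem.List.enumerate lst 0).foldl
          (fun d p => d.insert p.2.1 (PySem.Int.floordiv p.1 (q : Int) + 1)) PySem.Dict.empty := by
  have hcore := pv_core q hq 254 lst 0 (by omega)
  simp only [Nat.cast_zero, zero_add, zero_mul] at hcore
  have h1 : PySem.List.pyRange 0 254 1 = (List.range 254).map (fun k : Nat => (0 : Int) + (k : Int)) := by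
    have h254 : ((254 : Int) - 0).toNat = 254 := rfl
    rw [PySem.List.pyRange_one, h254]
  rw [h1, List.foldl_map]
  have hfun : (fun (acc : PySem.Dict String Int) (k : Nat) =>
        (PySem.List.slice lst (some (((0 : Int) + (k : Int)) * (q : Int)))
            (some (((0 : Int) + (k : Int) + 1) * (q : Int)))).foldl
          (fun d e => d.insert e.1 ((0 : Int) + (k : Int) + 1)) acc)
      = (fun acc k =>
        (((lst.drop (k * q)).take q).map (fun e => (e.1, ((k : Int) + 1)))).foldl
          (fun d p => d.insert p.1 p.2) acc) := by
    funext acc k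
    have hb1 : ((0 : Int) + (k : Int)) * (q : Int) = ((k * q : Nat) : Int) := by push_cast; ring
    have hb2 : ((0 : Int) + (k : Int) + 1) * (q : Int) = ((k * q : Nat) : Int) + ((q : Nat) : Int) := by
      push_cast; ring
    rw [hb1, hb2, PySem.List.slice_natCast_add, List.foldl_map]
    simp
  rw [hfun, pv_foldl_foldl_eq_foldl_flatMap (List.range 254)
      (fun k : Nat => ((lst.drop (k * q)).take q).map (fun e => (e.1, ((k : Int) + 1))))
      (fun d p => d.insert p.1 p.2) PySem.Dict.empty,
    hcore, List.foldl_map]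

-- ===== VERDICT (by name: the statement is the Claim_ definition above) =====
theorem gen_dictio_of_values_spec : Claim_equal_gen_dictio_of_values := by
  intro dictio_of_ips _
  unfold Spec_gen_dictio_of_values
  simp only [gen_dictio_of_values, gen_dictio_of_values_alt, pv_sort_neg, PySem.List.len_eq]
  set lst := PySem.List.sorted
      ((PySem.Dict.ofList dictio_of_ips).items.map (fun kv => (kv.1, (kv.2.length : Int))))
      (fun x => x.2) true with hlst
  by_cases hnil : lst = []
  · rw [hnil]
    simp [PySem.List.slice, PySem.Dict.empty]
  · have hpos : 0 < lst.length := List.length_pos_iff.mpr hnil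
    rw [if_neg (by exact_mod_cast Nat.cast_ne_zero.mpr (by omega))]
    rw [pv_build (fun x => PySem.Int.floordiv x (PySem.Int.floordiv ((lst.length : Int) + 253) 254) + 1) lst [] 0]
    simp only [List.nil_append]
    rw [pv_divisions_eq, pv_divisions_eq']
    have hq : 0 < (lst.length + 253) / 254 := by omega
    have hn : lst.length ≤ 254 * ((lst.length + 253) / 254) := by omega
    rw [pv_main lst ((lst.length + 253) / 254) hq hn]
    -- Dict.ofList of the built list is definitionally the same fold of inserts
    show _ = (((PySem.List.enumerate lst 0).map
        (fun q => (q.2.1, PySem.Int.floordiv q.1 ((((lst.length + 253) / 254 : Nat)) : Int) + 1))).foldl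
        (fun acc p => acc.insert p.1 p.2) PySem.Dict.empty).items
    rw [List.foldl_map]
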